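-- pv_equiv track=rewrite | github.com/jankrans/Conditional-Generative-Neural-Networks | repositories/profile-clustering/energyclustering/clustering/similarity/matching_similarity.py | _generate_blocks
-- ===== SOURCE A (Python) =====
-- import math
--
-- def _generate_blocks(nb_series, total_blocks=500):
--     """
--         A util function that divides the full matrix into several (equally-sized) blocks that can be calculated in parallel
--         The function won't generate 'total_blocks' directly but will simply try to find a number close enough
--
--         Returns a list of (start_row, end_row),(start_col, end_col)
--     """
--     blocks_each_dimension = math.ceil(math.sqrt(total_blocks))
--     profiles_per_block = math.ceil(nb_series / blocks_each_dimension)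
--     blocks = []
--     for row_start in range(0, nb_series, profiles_per_block):
--         row_end = min(row_start + profiles_per_block, nb_series)
--         for column_start in range(0, row_start + 1, profiles_per_block):
--             column_end = min(column_start + profiles_per_block, nb_series)
--             blocks.append(((row_start, row_end), (column_start, column_end)))
--     return blocks
-- ===== SOURCE B (Python) =====
-- import math
--
-- def _generate_blocks(nb_series, total_blocks=500):
--     """Single flat loop over triangular indices, decoded in closed form."""
--     blocks_each_dimension = math.ceil(math.sqrt(total_blocks))
--     profiles_per_block = math.ceil(nb_series / blocks_each_dimension)
--     nb_blocks = -(-nb_series // profiles_per_block)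
--     total = nb_blocks * (nb_blocks + 1) // 2
--     blocks = []
--     for t in range(total):
--         i = (math.isqrt(8 * t + 1) - 1) // 2
--         j = t - i * (i + 1) // 2
--         rs = i * profiles_per_block
--         cs = j * profiles_per_block
--         blocks.append(((rs, min(rs + profiles_per_block, nb_series)),
--                        (cs, min(cs + profiles_per_block, nb_series))))
--     return blocks
-- ===== Notes on version B (the rewrite author's own statement) =====
-- stated objective: alternative
-- what changed: Replaces A's nested row/column loops by a single flat loop over triangular indices t in range(nb_blocks*(nb_blocks+1)//2), recovering the (row, column) block pair from t in closed form via the inverse triangular number i=(isqrt(8t+1)-1)//2, j=t-i(i+1)//2.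
-- outside the precondition, e.g. on _generate_blocks(-2, 3): A returns [], B returns [((0, -2), (0, -2)), ((-1, -2), (0, -2)), ((-1, -2), (-1, -2))]; on _generate_blocks(0, 500): A raises ValueError, B raises ZeroDivisionError; on _generate_blocks(1, 0): A raises ZeroDivisionError, B raises ZeroDivisionError
import Mathlib
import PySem

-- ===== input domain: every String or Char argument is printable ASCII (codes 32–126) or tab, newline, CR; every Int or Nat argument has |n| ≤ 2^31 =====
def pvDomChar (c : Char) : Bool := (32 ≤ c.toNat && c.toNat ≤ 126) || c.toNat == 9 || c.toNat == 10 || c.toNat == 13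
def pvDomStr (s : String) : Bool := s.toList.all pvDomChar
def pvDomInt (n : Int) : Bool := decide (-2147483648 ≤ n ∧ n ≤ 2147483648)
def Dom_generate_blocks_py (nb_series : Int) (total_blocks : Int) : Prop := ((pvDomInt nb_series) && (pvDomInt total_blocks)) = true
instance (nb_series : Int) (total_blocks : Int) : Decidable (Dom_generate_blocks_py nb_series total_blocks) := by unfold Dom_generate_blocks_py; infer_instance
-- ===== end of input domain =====

-- B replaces A's nested row/column loops by one flat loop over triangular indices,
-- decoding (row-block, column-block) from the index in closed form; objective: alternative.


-- ===== PORT A =====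
-- math.ceil(math.sqrt(n)), hand-ported: exact for 0 ≤ n ≤ 2^31 (the correctly rounded
-- double sqrt of such n never rounds across an integer, so ceil agrees with integer ceil-sqrt).
def pvCeilSqrtFloat (n : Int) : Int :=
  if ((Nat.sqrt n.toNat : Int)) * ((Nat.sqrt n.toNat : Int)) = n then ((Nat.sqrt n.toNat : Int))
  else ((Nat.sqrt n.toNat : Int)) + 1

-- math.ceil(a / b) (true division then ceil), hand-ported as exact ceiling division:
-- exact for |a| ≤ 2^31 and 1 ≤ b ≤ 65536 (the float quotient never rounds across an integer).
def pvCeilDivFloat (a : Int) (b : Int) : Int := -(PySem.Int.floordiv (-a) b)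

def generate_blocks_py (nb_series : Int) (total_blocks : Int) : List ((Int × Int) × (Int × Int)) :=
  let blocks_each_dimension := pvCeilSqrtFloat total_blocks
  let profiles_per_block := pvCeilDivFloat nb_series blocks_each_dimension
  (PySem.List.pyRange 0 nb_series profiles_per_block).foldl (fun blocks row_start =>
    let row_end := min (row_start + profiles_per_block) nb_series
    (PySem.List.pyRange 0 (row_start + 1) profiles_per_block).foldl (fun blocks column_start =>
      let column_end := min (column_start + profiles_per_block) nb_series
      blocks ++ [((row_start, row_end), (column_start, column_end))]) blocks) []

-- ===== PORT B =====
-- math.isqrt(n), exact for 0 ≤ n (Source B only applies it to 8*t+1 ≥ 1)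
def pvIsqrt (n : Int) : Int := (Nat.sqrt n.toNat : Int)

def generate_blocks_py_alt (nb_series : Int) (total_blocks : Int) : List ((Int × Int) × (Int × Int)) :=
  let blocks_each_dimension := pvCeilSqrtFloat total_blocks
  let profiles_per_block := pvCeilDivFloat nb_series blocks_each_dimension
  let nb_blocks := -(PySem.Int.floordiv (-nb_series) profiles_per_block)
  let total := PySem.Int.floordiv (nb_blocks * (nb_blocks + 1)) 2
  (PySem.List.pyRange 0 total 1).foldl (fun blocks t =>
    let i := PySem.Int.floordiv (pvIsqrt (8 * t + 1) - 1) 2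
    let j := t - PySem.Int.floordiv (i * (i + 1)) 2
    let rs := i * profiles_per_block
    let cs := j * profiles_per_block
    blocks ++ [((rs, min (rs + profiles_per_block) nb_series),
                (cs, min (cs + profiles_per_block) nb_series))]) []

-- ===== PRECONDITION & SPEC =====
-- Pre_ restricts to the function's natural domain of positive counts: nb_series = 0 raises
-- ValueError (range step 0) in A, total_blocks = 0 raises ZeroDivisionError, total_blocks < 0
-- raises ValueError (math domain error), and for nb_series < 0 A iterates a negative-step
-- range producing meaningless negative "blocks" outside the function's purpose.
def Pre_generate_blocks_py (nb_series : Int) (total_blocks : Int) : Prop :=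
  1 ≤ nb_series ∧ 1 ≤ total_blocks
instance (nb_series : Int) (total_blocks : Int) : Decidable (Pre_generate_blocks_py nb_series total_blocks) := by unfold Pre_generate_blocks_py; infer_instance

def pvWitness_generate_blocks_py : Int × Int := (10, 4)

def Spec_generate_blocks_py (nb_series : Int) (total_blocks : Int) (out : List ((Int × Int) × (Int × Int))) : Prop := out = generate_blocks_py_alt nb_series total_blocks
instance (nb_series : Int) (total_blocks : Int) (out : List ((Int × Int) × (Int × Int))) : Decidable (Spec_generate_blocks_py nb_series total_blocks out) := by unfold Spec_generate_blocks_py; infer_instance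

-- ===== CLAIM (what is proved, stated in full; the proofs are below) =====
def Claim_equal_generate_blocks_py : Prop := ∀ (nb_series : Int) (total_blocks : Int), Dom_generate_blocks_py nb_series total_blocks → Pre_generate_blocks_py nb_series total_blocks → Spec_generate_blocks_py nb_series total_blocks (generate_blocks_py nb_series total_blocks)

-- ===== LEMMAS AND PROOFS =====

theorem pvCeilSqrtFloat_pos (n : Int) (h : 1 ≤ n) : 1 ≤ pvCeilSqrtFloat n := by
  unfold pvCeilSqrtFloat
  have h1 : 0 < Nat.sqrt n.toNat := Nat.sqrt_pos.mpr (by omega)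
  split_ifs <;> omega

theorem pvCeilDiv_eq (n p : Int) (hp : 0 < p) :
    -(PySem.Int.floordiv (-n) p) = (n + p - 1) / p := by
  rw [PySem.Int.neg_floordiv_neg_eq_iff_of_pos hp]
  have h := Int.mul_ediv_add_emod (n + p - 1) p
  have h0 := Int.emod_nonneg (n + p - 1) (by omega : p ≠ 0)
  have h1 := Int.emod_lt_of_pos (n + p - 1) hp
  constructor <;> nlinarith

theorem pvCeilDiv_pos (n p : Int) (hn : 1 ≤ n) (hp : 0 < p) :
    1 ≤ -(PySem.Int.floordiv (-n) p) := by
  rw [pvCeilDiv_eq n p hp]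
  rw [Int.le_ediv_iff_mul_le hp]
  omega

theorem pvRange_step_eq (n p : Int) (hn : 1 ≤ n) (hp : 1 ≤ p) :
    PySem.List.pyRange 0 n p
      = (List.range ((n + p - 1) / p).toNat).map (fun k : Nat => p * (k : Int)) := by
  rw [PySem.List.pyRange_of_pos 0 n (by omega : (0:Int) < p)]
  simp only [if_pos (by omega : (0:Int) < n), Int.sub_zero, zero_add]

theorem pvRange_inner_eq (p : Int) (hp : 1 ≤ p) (k : Nat) :
    PySem.List.pyRange 0 (p * (k : Int) + 1) p
      = (List.range (k + 1)).map (fun j : Nat => p * (j : Int)) := by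
  have hk0 : (0:Int) ≤ p * (k : Int) := by positivity
  rw [PySem.List.pyRange_of_pos 0 _ (by omega : (0:Int) < p)]
  have harg : p * (k : Int) + 1 - 0 + p - 1 = p * ((k : Int) + 1) := by ring
  rw [if_pos (by omega : (0:Int) < p * (k : Int) + 1), harg,
    Int.mul_ediv_cancel_left _ (by omega : p ≠ 0)]
  have htn : ((k : Int) + 1).toNat = k + 1 := by omega
  simp only [htn, zero_add]

theorem pvRange_one_eq (b : Int) :
    PySem.List.pyRange 0 b 1 = (List.range b.toNat).map (fun k : Nat => (k : Int)) := by
  rw [PySem.List.pyRange_one]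
  simp

-- the row index decoded from a triangular index T(m)+j (j ≤ m) is m
theorem pvRowOf (m j : Nat) (hj : j ≤ m) :
    (Nat.sqrt (8 * (m * (m + 1) / 2 + j) + 1) - 1) / 2 = m := by
  obtain ⟨c, hc⟩ := Nat.even_mul_succ_self m
  have hlo : 2 * m + 1 ≤ Nat.sqrt (8 * (m * (m + 1) / 2 + j) + 1) := by
    rw [Nat.le_sqrt]
    have he : (2 * m + 1) * (2 * m + 1) = 4 * (m * (m + 1)) + 1 := by ring
    rw [he]; omega
  have hhi : Nat.sqrt (8 * (m * (m + 1) / 2 + j) + 1) < 2 * m + 3 := by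
    rw [Nat.sqrt_lt]
    have he : (2 * m + 3) * (2 * m + 3) = 4 * (m * (m + 1)) + 8 * m + 9 := by ring
    rw [he]; omega
  omega

-- flattening: the map over triangular indices with closed-form decoding IS the triangular flatMap
theorem pvTri {α : Type} (f : Nat → Nat → α) : ∀ (m : Nat),
    (List.range (m * (m + 1) / 2)).map (fun t =>
        f ((Nat.sqrt (8 * t + 1) - 1) / 2)
          (t - ((Nat.sqrt (8 * t + 1) - 1) / 2) * ((Nat.sqrt (8 * t + 1) - 1) / 2 + 1) / 2))
      = (List.range m).flatMap (fun i => (List.range (i + 1)).map (fun j => f i j))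
  | 0 => by simp
  | (m + 1) => by
    have hc := Nat.even_mul_succ_self m
    have hd := Nat.even_mul_succ_self (m + 1)
    obtain ⟨c, hc⟩ := hc
    obtain ⟨d, hd⟩ := hd
    have hring : (m + 1) * (m + 1 + 1) = m * (m + 1) + 2 * (m + 1) := by ring
    have hT : (m + 1) * (m + 1 + 1) / 2 = m * (m + 1) / 2 + (m + 1) := by omega
    rw [hT, List.range_add, List.map_append, pvTri f m, List.range_succ, List.flatMap_append]
    congr 1
    simp only [List.flatMap_cons, List.flatMap_nil, List.append_nil, List.map_map]
    rw [← List.range_succ]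
    apply List.map_congr_left
    intro j hj
    simp only [List.mem_range] at hj
    simp only [Function.comp]
    rw [pvRowOf m j (by omega)]
    congr 1
    omega

theorem pvMain (n p : Int) (hn : 1 ≤ n) (hp : 1 ≤ p) :
    (PySem.List.pyRange 0 n p).foldl (fun blocks row_start =>
      (PySem.List.pyRange 0 (row_start + 1) p).foldl (fun blocks column_start =>
        blocks ++ [((row_start, min (row_start + p) n),
                    (column_start, min (column_start + p) n))]) blocks) []
    = (PySem.List.pyRange 0
         (PySem.Int.floordiv ((-(PySem.Int.floordiv (-n) p)) * ((-(PySem.Int.floordiv (-n) p)) + 1)) 2) 1).foldl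
        (fun blocks t =>
          let i := PySem.Int.floordiv (pvIsqrt (8 * t + 1) - 1) 2
          let j := t - PySem.Int.floordiv (i * (i + 1)) 2
          blocks ++ [((i * p, min (i * p + p) n), (j * p, min (j * p + p) n))]) [] := by
  have hM1 : 1 ≤ -(PySem.Int.floordiv (-n) p) := pvCeilDiv_pos n p hn (by omega)
  set M : Nat := ((n + p - 1) / p).toNat with hMdef
  have hMc : -(PySem.Int.floordiv (-n) p) = (M : Int) := by
    rw [pvCeilDiv_eq n p (by omega)]
    rw [pvCeilDiv_eq n p (by omega)] at hM1
    omega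
  -- LHS to flatMap over List.range M
  simp only [PySem.List.foldl_append_singleton_eq_map]
  simp only [PySem.List.foldl_append_eq_flatMap, List.nil_append]
  rw [pvRange_step_eq n p hn hp, ← hMdef]
  simp only [List.flatMap_map]
  -- RHS total to a Nat cast
  rw [hMc]
  have htot : PySem.Int.floordiv ((M : Int) * ((M : Int) + 1)) 2
      = ((M * (M + 1) / 2 : Nat) : Int) := by
    have hcast : ((M : Int) * ((M : Int) + 1)) = ((M * (M + 1) : Nat) : Int) := by push_cast; ring
    rw [hcast]
    exact_mod_cast PySem.Int.floordiv_natCast (M * (M + 1)) 2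
  rw [htot, pvRange_one_eq]
  have htn : ((M * (M + 1) / 2 : Nat) : Int).toNat = M * (M + 1) / 2 := by omega
  rw [htn, List.map_map]
  -- normalise the A side's inner ranges, then reduce to the pure Nat triangular flattening
  trans ((List.range M).flatMap (fun (i : Nat) => (List.range (i + 1)).map (fun (j : Nat) =>
      ((p * (i : Int), min (p * (i : Int) + p) n), (p * (j : Int), min (p * (j : Int) + p) n)))))
  · apply List.flatMap_congr
    intro k _
    rw [pvRange_inner_eq p hp k, List.map_map]
    rfl
  rw [← pvTri (fun i j => ((p * (i : Int), min (p * (i : Int) + p) n),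
                           (p * (j : Int), min (p * (j : Int) + p) n))) M]
  apply Eq.symm
  apply List.map_congr_left
  intro t _
  simp only [Function.comp]
  -- decode at the Int level equals the Nat-level decode, cast
  have harg : (8 * (t : Int) + 1).toNat = 8 * t + 1 := by omega
  have hs1 : 1 ≤ Nat.sqrt (8 * t + 1) := Nat.le_sqrt.mpr (by omega)
  have hi : PySem.Int.floordiv (pvIsqrt (8 * (t : Int) + 1) - 1) 2
      = (((Nat.sqrt (8 * t + 1) - 1) / 2 : Nat) : Int) := by
    unfold pvIsqrt
    rw [harg]
    have hcast : ((Nat.sqrt (8 * t + 1) : Nat) : Int) - 1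
        = ((Nat.sqrt (8 * t + 1) - 1 : Nat) : Int) := by omega
    rw [hcast]
    exact_mod_cast PySem.Int.floordiv_natCast (Nat.sqrt (8 * t + 1) - 1) 2
  set r : Nat := (Nat.sqrt (8 * t + 1) - 1) / 2 with hrdef
  have hj : (t : Int) - PySem.Int.floordiv ((r : Int) * ((r : Int) + 1)) 2
      = ((t - r * (r + 1) / 2 : Nat) : Int) := by
    have hcast : ((r : Int) * ((r : Int) + 1)) = ((r * (r + 1) : Nat) : Int) := by push_cast; ring
    rw [hcast]
    rw [show PySem.Int.floordiv ((r * (r + 1) : Nat) : Int) 2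
        = ((r * (r + 1) / 2 : Nat) : Int) from
      by exact_mod_cast PySem.Int.floordiv_natCast (r * (r + 1)) 2]
    -- r*(r+1)/2 ≤ t, from (2r+1)^2 ≤ 8t+1
    have h2r1 : 2 * r + 1 ≤ Nat.sqrt (8 * t + 1) := by omega
    have hss : Nat.sqrt (8 * t + 1) * Nat.sqrt (8 * t + 1) ≤ 8 * t + 1 := Nat.sqrt_le _
    have hq : (2 * r + 1) * (2 * r + 1) ≤ 8 * t + 1 :=
      le_trans (Nat.mul_le_mul h2r1 h2r1) hss
    have hexp : (2 * r + 1) * (2 * r + 1) = 4 * (r * (r + 1)) + 1 := by ring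
    rw [hexp] at hq
    omega
  rw [hi, hj]
  simp [mul_comm]

-- ===== VERDICT (by name: the statement is the Claim_ definition above) =====
theorem generate_blocks_py_spec : Claim_equal_generate_blocks_py := by
  intro nb tb _ hpre
  obtain ⟨hn, ht⟩ := hpre
  show generate_blocks_py nb tb = generate_blocks_py_alt nb tb
  have hbed : 1 ≤ pvCeilSqrtFloat tb := pvCeilSqrtFloat_pos tb ht
  have hp : 1 ≤ pvCeilDivFloat nb (pvCeilSqrtFloat tb) :=
    pvCeilDiv_pos nb (pvCeilSqrtFloat tb) hn (by omega)
  simp only [generate_blocks_py, generate_blocks_py_alt, pvCeilDivFloat]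
  exact pvMain nb (-(PySem.Int.floordiv (-nb) (pvCeilSqrtFloat tb))) hn hp
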